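-- pv_equiv track=rewrite | github.com/Golpette/antibiotic-resistance | Data analysis scripts/make_fitness_landscape_allWells.py | enum_rxns
-- ===== SOURCE A (Python) =====
-- def enum_rxns( geno, rxn_list, no_drivers ):
--     ''' DFS algorithm to enumerate all reactions '''
--     # if we give [0,0,0,0,0] as start genotype
--
--     for x in range( len(geno) ):
--         newlist = list(geno)
--         newlist[ x ] = 1
--         tot=0
--         for n in newlist:
--             tot += n
--             if( tot > no_drivers ):
--                 # Only want individual reactions, not every single
--                 # mutational pathway
--                 if( (geno,newlist) not in rxn_list ):
--                     rxn_list.append( (geno,newlist) )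
--                     no_drivers += 1
--                     enum_rxns( newlist, rxn_list, no_drivers )
--                     no_drivers -= 1
--     return rxn_list
-- ===== SOURCE B (Python) =====
-- def enum_rxns(geno, rxn_list, no_drivers):
--     ''' Explicit-stack DFS enumerating the same reactions in the same order
--         (mutates and returns the same rxn_list object, like the original). '''
--     def children(g, nd):
--         out = []
--         for x in range(len(g)):
--             nl = list(g)
--             nl[x] = 1
--             tot = 0
--             for n in nl:
--                 tot += n
--                 if tot > nd:
--                     out.append((g, nl))
--                     break
--         return out
--
--     stack = [(s, d, no_drivers + 1) for (s, d) in reversed(children(geno, no_drivers))]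
--     while stack:
--         s, d, nd = stack.pop()
--         if (s, d) not in rxn_list:
--             rxn_list.append((s, d))
--             stack.extend((a, b, nd + 1) for (a, b) in reversed(children(d, nd)))
--     return rxn_list
-- ===== Notes on version B (the rewrite author's own statement) =====
-- stated objective: alternative
-- what changed: The recursive DFS with a mutated no_drivers counter and a per-prefix membership test is replaced by an explicit LIFO stack of (src,dst,threshold) edge tokens: children are generated once per node (first prefix-sum hit, with break), pushed in reverse, and deduplicated once at pop time.
import Mathlib
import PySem

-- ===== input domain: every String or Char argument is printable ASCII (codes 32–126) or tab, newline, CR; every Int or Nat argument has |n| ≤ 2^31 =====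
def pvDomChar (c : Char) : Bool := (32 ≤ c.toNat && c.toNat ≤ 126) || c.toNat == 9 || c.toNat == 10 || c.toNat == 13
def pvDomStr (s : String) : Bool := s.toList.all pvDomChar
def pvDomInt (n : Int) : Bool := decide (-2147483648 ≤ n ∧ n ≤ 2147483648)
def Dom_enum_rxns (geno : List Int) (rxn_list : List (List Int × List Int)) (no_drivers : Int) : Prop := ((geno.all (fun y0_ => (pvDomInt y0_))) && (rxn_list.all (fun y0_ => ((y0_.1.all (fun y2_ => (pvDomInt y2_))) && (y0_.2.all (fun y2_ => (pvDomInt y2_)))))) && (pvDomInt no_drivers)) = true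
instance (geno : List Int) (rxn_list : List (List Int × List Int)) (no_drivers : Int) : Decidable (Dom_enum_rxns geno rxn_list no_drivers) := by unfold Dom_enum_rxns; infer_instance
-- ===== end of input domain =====

-- B replaces A's recursive DFS by an explicit LIFO stack of (src,dst,threshold) edge
-- tokens with pop-time dedup (objective: alternative decomposition, same cost).
-- Equivalence is about the RETURN value; both Pythons also mutate rxn_list in place identically.

-- ===== PORT A =====
-- A's recursion terminates on every input (depth ≤ 2*len(geno)+1), so the port
-- carries a fuel counter 2*len+3 that is never exhausted; it only makes the
-- same recursion structurally total.
def enumA : Nat → List Int → List (List Int × List Int) → Int → List (List Int × List Int)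
  | 0, _, rxn, _ => rxn
  | f+1, geno, rxn, nd =>
    (List.range geno.length).foldl (fun rxn x =>
      let newlist := geno.set x 1
      (newlist.foldl (fun (st : Int × List (List Int × List Int)) n =>
        let tot := st.1 + n
        if tot > nd then
          if (geno, newlist) ∈ st.2 then (tot, st.2)
          else (tot, enumA f newlist (st.2 ++ [(geno, newlist)]) (nd+1))
        else (tot, st.2)) ((0 : Int), rxn)).2) rxn

def enum_rxns (geno : List Int) (rxn_list : List (List Int × List Int)) (no_drivers : Int) : List (List Int × List Int) :=
  enumA (2 * geno.length + 3) geno rxn_list no_drivers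

-- ===== PORT B =====
-- Source B's inner 'for n in nl: … break' scan:
def hitsB : List Int → Int → Int → Bool
  | [], _, _ => false
  | n :: rest, tot, nd => if tot + n > nd then true else hitsB rest (tot + n) nd

-- Source B's children(g, nd)
def childrenB (g : List Int) (nd : Int) : List (List Int × List Int) :=
  (List.range g.length).foldl (fun out x =>
    let nl := g.set x 1
    if hitsB nl 0 nd then out ++ [(g, nl)] else out) []

-- Source B pushes reversed children and pops from the end; here the list head is the
-- stack top, so pushing children in order is the same LIFO discipline.  Each token
-- additionally carries a fuel counter (generation bound, never exhausted on the
-- seeded stacks) used only to make the loop structurally total.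

-- characterisation of childrenB used for termination (and again in the proofs below)
theorem childrenB_eq (g : List Int) (nd : Int) :
    childrenB g nd = (List.range g.length).filterMap
      (fun x => if hitsB (g.set x 1) 0 nd then some (g, g.set x 1) else none) := by
  unfold childrenB
  have aux : ∀ (xs : List Nat) (acc : List (List Int × List Int)),
      (xs.foldl (fun out x =>
        let nl := g.set x 1
        if hitsB nl 0 nd then out ++ [(g, nl)] else out) acc) =
      acc ++ xs.filterMap (fun x => if hitsB (g.set x 1) 0 nd then some (g, g.set x 1) else none) := by
    intro xs
    induction xs with
    | nil => intro acc; simp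
    | cons x xs ih =>
      intro acc
      simp only [List.foldl_cons, List.filterMap_cons]
      split <;> simp [ih]
  simpa using aux (List.range g.length) []

theorem childrenB_len_le (g : List Int) (nd : Int) : (childrenB g nd).length ≤ g.length := by
  rw [childrenB_eq]
  exact le_trans (List.length_filterMap_le _ _) (by simp)

theorem childrenB_mem_len (g : List Int) (nd : Int) {p : List Int × List Int}
    (hp : p ∈ childrenB g nd) : p.2.length = g.length := by
  rw [childrenB_eq] at hp
  rcases List.mem_filterMap.1 hp with ⟨x, _, hx⟩
  split at hx
  · cases Option.some.inj hx; simp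
  · cases hx

def tokensOf (d : List Int) (nd : Int) : Nat → List (List Int × List Int × Int × Nat)
  | 0 => []
  | fc+1 => (childrenB d nd).map (fun p => (p.1, p.2, nd + 1, fc))

theorem loopB_child_weight (d : List Int) (nd : Int) (fc : Nat) :
    (((childrenB d nd).map (fun p => (p.1, p.2, nd + 1, fc))).map
      (fun t => (t.2.1.length + 1) ^ t.2.2.2)).sum < (d.length + 1) ^ (fc + 1) := by
  have hc : 0 < (d.length + 1) ^ fc := pow_pos (Nat.succ_pos _) fc
  have hle : (((childrenB d nd).map (fun p => (p.1, p.2, nd + 1, fc))).map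
      (fun t => (t.2.1.length + 1) ^ t.2.2.2)).sum
      ≤ (childrenB d nd).length * ((d.length + 1) ^ fc) := by
    rw [List.map_map]
    have : ∀ w ∈ (childrenB d nd).map
        ((fun t : List Int × List Int × Int × Nat => (t.2.1.length + 1) ^ t.2.2.2) ∘
          (fun p => (p.1, p.2, nd + 1, fc))), w ≤ (d.length + 1) ^ fc := by
      intro w hw
      rcases List.mem_map.1 hw with ⟨p, hp, hpe⟩
      simp only [Function.comp] at hpe
      rw [← hpe, childrenB_mem_len d nd hp]
    calc _ ≤ ((childrenB d nd).map _).length • ((d.length + 1) ^ fc) := List.sum_le_card_nsmul _ _ this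
    _ = (childrenB d nd).length * ((d.length + 1) ^ fc) := by simp [smul_eq_mul]
  calc _ ≤ (childrenB d nd).length * ((d.length + 1) ^ fc) := hle
  _ ≤ d.length * ((d.length + 1) ^ fc) := Nat.mul_le_mul_right _ (childrenB_len_le d nd)
  _ < (d.length + 1) * ((d.length + 1) ^ fc) := by
      exact Nat.mul_lt_mul_of_lt_of_le (Nat.lt_succ_self _) (le_refl _) hc
  _ = (d.length + 1) ^ (fc + 1) := by ring

theorem tokensOf_weight (d : List Int) (nd : Int) (f : Nat) :
    ((tokensOf d nd f).map (fun t => (t.2.1.length + 1) ^ t.2.2.2)).sum < (d.length + 1) ^ f := by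
  cases f with
  | zero => simp [tokensOf]
  | succ fc => simpa [tokensOf] using loopB_child_weight d nd fc

def loopB : List (List Int × List Int × Int × Nat) → List (List Int × List Int) → List (List Int × List Int)
  | [], rxn => rxn
  | (s, d, nd, f) :: rest, rxn =>
    if (s, d) ∈ rxn then loopB rest rxn
    else loopB (tokensOf d nd f ++ rest) (rxn ++ [(s, d)])
  termination_by stack _ => (stack.map (fun t => (t.2.1.length + 1) ^ t.2.2.2)).sum
  decreasing_by
    · simp only [List.map_cons, List.sum_cons]
      have : 0 < (d.length + 1) ^ f := pow_pos (Nat.succ_pos _) f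
      omega
    · simp only [List.map_cons, List.sum_cons, List.map_append, List.sum_append]
      have := tokensOf_weight d nd f
      omega

def enum_rxns_alt (geno : List Int) (rxn_list : List (List Int × List Int)) (no_drivers : Int) : List (List Int × List Int) :=
  loopB ((childrenB geno no_drivers).map (fun p => (p.1, p.2, no_drivers + 1, 2 * geno.length + 2))) rxn_list

-- ===== PRECONDITION & SPEC =====
def Spec_enum_rxns (geno : List Int) (rxn_list : List (List Int × List Int)) (no_drivers : Int) (out : List (List Int × List Int)) : Prop := out = enum_rxns_alt geno rxn_list no_drivers
instance (geno : List Int) (rxn_list : List (List Int × List Int)) (no_drivers : Int) (out : List (List Int × List Int)) : Decidable (Spec_enum_rxns geno rxn_list no_drivers out) := by unfold Spec_enum_rxns; infer_instance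

-- ===== CLAIM (what is proved, stated in full; the proofs are below) =====
def Claim_equal_enum_rxns : Prop := ∀ (geno : List Int) (rxn_list : List (List Int × List Int)) (no_drivers : Int), Dom_enum_rxns geno rxn_list no_drivers → Spec_enum_rxns geno rxn_list no_drivers (enum_rxns geno rxn_list no_drivers)

-- ===== LEMMAS AND PROOFS =====

-- the inner-loop step of A's port, named so lemmas can speak about it
def stepA (f : Nat) (geno nl : List Int) (nd : Int)
    (st : Int × List (List Int × List Int)) (n : Int) : Int × List (List Int × List Int) :=
  let tot := st.1 + n
  if tot > nd then
    if (geno, nl) ∈ st.2 then (tot, st.2)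
    else (tot, enumA f nl (st.2 ++ [(geno, nl)]) (nd+1))
  else (tot, st.2)

theorem enumA_succ (f : Nat) (geno : List Int) (rxn : List (List Int × List Int)) (nd : Int) :
    enumA (f+1) geno rxn nd =
      (List.range geno.length).foldl (fun rxn x =>
        (List.foldl (stepA f geno (geno.set x 1) nd) ((0 : Int), rxn) (geno.set x 1)).2) rxn := by
  rfl

-- A only appends to rxn_list
theorem enumA_ext (f : Nat) : ∀ (geno : List Int) (rxn : List (List Int × List Int)) (nd : Int),
    ∃ t, enumA f geno rxn nd = rxn ++ t := by
  induction f with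
  | zero => intro geno rxn nd; exact ⟨[], by simp [enumA]⟩
  | succ f ih =>
    intro geno rxn nd
    have inner : ∀ (nl : List Int) (xs : List Int) (tot : Int) (r : List (List Int × List Int)),
        ∃ t, (List.foldl (stepA f geno nl nd) (tot, r) xs).2 = r ++ t := by
      intro nl xs
      induction xs with
      | nil => intro tot r; exact ⟨[], by simp⟩
      | cons n xs ihx =>
        intro tot r
        simp only [List.foldl_cons, stepA]
        split
        · split
          · exact ihx _ _
          · rcases ih nl (r ++ [(geno, nl)]) (nd+1) with ⟨t1, ht1⟩
            rcases ihx (tot + n) (enumA f nl (r ++ [(geno, nl)]) (nd+1)) with ⟨t2, ht2⟩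
            rw [ht1] at ht2
            refine ⟨[(geno, nl)] ++ t1 ++ t2, ?_⟩
            rw [ht1]
            simpa using ht2
        · exact ihx _ _
    have outer : ∀ (xs : List Nat) (r : List (List Int × List Int)),
        ∃ t, (xs.foldl (fun r x =>
          (List.foldl (stepA f geno (geno.set x 1) nd) ((0 : Int), r) (geno.set x 1)).2) r) = r ++ t := by
      intro xs
      induction xs with
      | nil => intro r; exact ⟨[], by simp⟩
      | cons x xs ihx =>
        intro r
        simp only [List.foldl_cons]
        rcases inner (geno.set x 1) (geno.set x 1) 0 r with ⟨t1, ht1⟩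
        rcases ihx ((List.foldl (stepA f geno (geno.set x 1) nd) ((0 : Int), r) (geno.set x 1)).2) with ⟨t2, ht2⟩
        exact ⟨t1 ++ t2, by rw [ht2, ht1, List.append_assoc]⟩
    rw [enumA_succ]
    exact outer _ _

theorem enumA_mem (f : Nat) (geno : List Int) (rxn : List (List Int × List Int)) (nd : Int)
    {p : List Int × List Int} (hp : p ∈ rxn) : p ∈ enumA f geno rxn nd := by
  rcases enumA_ext f geno rxn nd with ⟨t, ht⟩
  rw [ht]; exact List.mem_append_left _ hp

-- once the pair is recorded, the rest of the inner loop does nothing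
theorem stepA_noop (f : Nat) (geno nl : List Int) (nd : Int) :
    ∀ (xs : List Int) (tot : Int) (r : List (List Int × List Int)),
      (geno, nl) ∈ r → (List.foldl (stepA f geno nl nd) (tot, r) xs).2 = r := by
  intro xs
  induction xs with
  | nil => intro tot r _; simp
  | cons n xs ihx =>
    intro tot r hmem
    simp only [List.foldl_cons, stepA, if_pos hmem]
    split <;> exact ihx _ _ hmem

-- the inner loop acts exactly once, at the first prefix sum exceeding nd
theorem innerFold (f : Nat) (geno nl : List Int) (nd : Int) :
    ∀ (xs : List Int) (tot : Int) (r : List (List Int × List Int)),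
      (List.foldl (stepA f geno nl nd) (tot, r) xs).2 =
        if hitsB xs tot nd then
          (if (geno, nl) ∈ r then r else enumA f nl (r ++ [(geno, nl)]) (nd+1))
        else r := by
  intro xs
  induction xs with
  | nil => intro tot r; simp [hitsB]
  | cons n xs ihx =>
    intro tot r
    simp only [List.foldl_cons, stepA, hitsB]
    by_cases h : tot + n > nd
    · by_cases hm : (geno, nl) ∈ r
      · simp only [h, hm, if_true]
        exact stepA_noop f geno nl nd xs _ r hm
      · simp only [h, hm, if_true, if_false]
        exact stepA_noop f geno nl nd xs _ _
          (enumA_mem f nl _ (nd+1) (List.mem_append_right _ (List.mem_singleton.2 rfl)))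
    · simp only [h, if_false]
      exact ihx _ _

-- A's body, flattened: fold the dedup-gated recursion over the candidate list
theorem enumA_flatten (f : Nat) (geno : List Int) (rxn : List (List Int × List Int)) (nd : Int) :
    enumA (f+1) geno rxn nd =
      (childrenB geno nd).foldl
        (fun r p => if p ∈ r then r else enumA f p.2 (r ++ [p]) (nd+1)) rxn := by
  rw [enumA_succ]
  rw [List.foldl_ext (g := fun r x =>
      if hitsB (geno.set x 1) 0 nd then
        (if (geno, geno.set x 1) ∈ r then r else enumA f (geno.set x 1) (r ++ [(geno, geno.set x 1)]) (nd+1))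
      else r)
    (H := by intro r x _; exact innerFold f geno (geno.set x 1) nd (geno.set x 1) 0 r)]
  rw [childrenB_eq, List.foldl_filterMap]
  apply List.foldl_ext
  intro r x _
  by_cases h : hitsB (geno.set x 1) 0 nd <;> simp [h]

-- simulation: running the stack loop on a node's tokens equals folding A's gated recursion
theorem loopB_sim (f : Nat) :
    ∀ (cs : List (List Int × List Int)) (nd' : Int)
      (rxn : List (List Int × List Int)) (rest : List (List Int × List Int × Int × Nat)),
      loopB (cs.map (fun p => (p.1, p.2, nd', f)) ++ rest) rxn =
        loopB rest (cs.foldl (fun r p => if p ∈ r then r else enumA f p.2 (r ++ [p]) nd') rxn) := by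
  induction f with
  | zero =>
    intro cs
    induction cs with
    | nil => intro nd' rxn rest; simp
    | cons p cs ihc =>
      intro nd' rxn rest
      simp only [List.map_cons, List.cons_append, List.foldl_cons]
      rw [loopB]
      by_cases hm : (p.1, p.2) ∈ rxn
      · rw [if_pos hm]
        have hm' : p ∈ rxn := by rwa [Prod.mk.eta] at hm
        rw [if_pos hm']
        exact ihc nd' rxn rest
      · rw [if_neg hm]
        have hm' : p ∉ rxn := by rwa [Prod.mk.eta] at hm
        rw [if_neg hm']
        simp only [tokensOf, List.nil_append]
        have : enumA 0 p.2 (rxn ++ [p]) nd' = rxn ++ [p] := by simp [enumA]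
        rw [this, ← Prod.mk.eta (p := p)] at *
        exact ihc nd' _ rest
  | succ fc ih =>
    intro cs
    induction cs with
    | nil => intro nd' rxn rest; simp
    | cons p cs ihc =>
      intro nd' rxn rest
      simp only [List.map_cons, List.cons_append, List.foldl_cons]
      rw [loopB]
      by_cases hm : (p.1, p.2) ∈ rxn
      · rw [if_pos hm]
        have hm' : p ∈ rxn := by rwa [Prod.mk.eta] at hm
        rw [if_pos hm']
        exact ihc nd' rxn rest
      · rw [if_neg hm]
        have hm' : p ∉ rxn := by rwa [Prod.mk.eta] at hm
        rw [if_neg hm']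
        simp only [tokensOf]
        rw [ih (childrenB p.2 nd') (nd' + 1) (rxn ++ [(p.1, p.2)]) _]
        rw [Prod.mk.eta]
        rw [← enumA_flatten fc p.2 (rxn ++ [p]) nd']
        exact ihc nd' _ rest

theorem enum_rxns_eq_alt (geno : List Int) (rxn_list : List (List Int × List Int)) (no_drivers : Int) :
    enum_rxns geno rxn_list no_drivers = enum_rxns_alt geno rxn_list no_drivers := by
  unfold enum_rxns enum_rxns_alt
  have h3 : 2 * geno.length + 3 = (2 * geno.length + 2) + 1 := rfl
  rw [h3, enumA_flatten]
  have := loopB_sim (2 * geno.length + 2) (childrenB geno no_drivers) (no_drivers + 1) rxn_list []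
  simp only [List.append_nil] at this
  rw [this, loopB]

-- ===== VERDICT (by name: the statement is the Claim_ definition above) =====
theorem enum_rxns_spec : Claim_equal_enum_rxns := by
  intro geno rxn_list no_drivers _
  unfold Spec_enum_rxns
  exact enum_rxns_eq_alt geno rxn_list no_drivers
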